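-- pv_equiv track=rewrite | github.com/giserh/morton | pyindex/interleave.py | interleave4_any_length_input
-- ===== SOURCE A (Python) =====
-- from math import ceil
--
-- def part1by3(n):
--     """
--     Inserts three 0 bits between each bit in `n`.
--
--     Ref: helpful description at http://stackoverflow.com/a/1024889
--
--     n: 16-bit integer
--     """
--     n &= 0x000000000000FFFF
--     n = (n ^ (n << 24)) & 0x000000FF000000FF
--     n = (n ^ (n << 12)) & 0x000F000F000F000F
--     n = (n ^ (n << 6)) & 0x0303030303030303
--     n = (n ^ (n << 3)) & 0x1111111111111111
--     return n
--
-- def interleave4_any_length_input(v, x, y, z):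
--     """
--     Allow interleaving of 4 integers of any (equal) length by finding the
--     maximum length of each of them and iterating over groups of 16-bit integer
--     to build up the interleaved number
--
--     Note that if the integers are different bit lengths, the shorter integer is
--     still zero padded (this is also the case for interleave2).
--     """
--
--     max_bits = max(
--         v.bit_length(), x.bit_length(), y.bit_length(), z.bit_length()
--     )
--     # if any integer is > 16 bits, do the interleaving more than
--     # once
--     iterations = int(ceil(max_bits / 16))
--     ret = 0
--     for i in range(iterations):
--         # interleave to get a 64 bit integer
--         interleaved = part1by3(v & 0xFFFF) | \
--                       (part1by3(x & 0xFFFF) << 1) | \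
--                       (part1by3(y & 0xFFFF) << 2) | \
--                       (part1by3(z & 0xFFFF) << 3)
--         # left shift the interleaved numbers for this iteration
--         ret |= (interleaved << (64 * i))
--         # right shift v, x, y and z by 16 so we do the next iteration on the
--         # next 16 digits
--         v >>= 16
--         x >>= 16
--         y >>= 16
--         z >>= 16
--     return ret
-- ===== SOURCE B (Python) =====
-- def interleave4_any_length_input(v, x, y, z):
--     """Bit-by-bit Morton encode: spread each input bit directly to its
--     target position instead of SWAR mask/shift passes on 16-bit chunks."""
--     max_bits = max(
--         v.bit_length(), x.bit_length(), y.bit_length(), z.bit_length()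
--     )
--     total = 16 * ((max_bits + 15) // 16)
--     ret = 0
--     for j in range(total):
--         ret |= (((v >> j) & 1) << (4 * j)) | \
--                (((x >> j) & 1) << (4 * j + 1)) | \
--                (((y >> j) & 1) << (4 * j + 2)) | \
--                (((z >> j) & 1) << (4 * j + 3))
--     return ret
-- ===== Notes on version B (the rewrite author's own statement) =====
-- stated objective: simpler
-- what changed: Replaces the SWAR part1by3 mask/xor/shift passes over 16-bit chunks by a single plain loop that moves each input bit directly to its interleaved position (bit j of v/x/y/z goes to bit 4j/4j+1/4j+2/4j+3), looping over 16*ceil(max_bits/16) bit positions so negative inputs' two's-complement low chunks match.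
import Mathlib
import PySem

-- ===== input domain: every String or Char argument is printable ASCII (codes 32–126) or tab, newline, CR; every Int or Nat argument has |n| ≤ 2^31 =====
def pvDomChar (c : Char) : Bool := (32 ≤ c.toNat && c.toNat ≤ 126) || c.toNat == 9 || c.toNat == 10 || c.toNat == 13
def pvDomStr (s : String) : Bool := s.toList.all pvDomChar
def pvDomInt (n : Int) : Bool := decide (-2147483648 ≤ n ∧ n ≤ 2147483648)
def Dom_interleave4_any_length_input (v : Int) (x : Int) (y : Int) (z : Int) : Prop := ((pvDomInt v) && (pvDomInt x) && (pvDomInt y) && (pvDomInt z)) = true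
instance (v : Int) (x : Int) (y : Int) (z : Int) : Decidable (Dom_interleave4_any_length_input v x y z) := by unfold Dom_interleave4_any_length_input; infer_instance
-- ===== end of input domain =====

-- B replaces A's SWAR part1by3 mask/xor/shift passes over 16-bit chunks by one plain loop
-- that moves each input bit directly to its interleaved target position (objective: simpler).

-- ===== PORT A =====
def part1by3 (n : Int) : Int :=
  let n1 := PySem.Int.band n 0xFFFF
  let n2 := PySem.Int.band (PySem.Int.bxor n1 (n1 <<< (24 : Nat))) 0x000000FF000000FF
  let n3 := PySem.Int.band (PySem.Int.bxor n2 (n2 <<< (12 : Nat))) 0x000F000F000F000F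
  let n4 := PySem.Int.band (PySem.Int.bxor n3 (n3 <<< (6 : Nat))) 0x0303030303030303
  PySem.Int.band (PySem.Int.bxor n4 (n4 <<< (3 : Nat))) 0x1111111111111111

-- one pass of A's `for i in range(iterations)` body (state: v, x, y, z, ret)
def stepA (st : Int × Int × Int × Int × Int) (i : Nat) : Int × Int × Int × Int × Int :=
  let interleaved := PySem.Int.bor (PySem.Int.bor (PySem.Int.bor
      (part1by3 (PySem.Int.band st.1 0xFFFF))
      ((part1by3 (PySem.Int.band st.2.1 0xFFFF)) <<< (1 : Nat)))
      ((part1by3 (PySem.Int.band st.2.2.1 0xFFFF)) <<< (2 : Nat)))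
      ((part1by3 (PySem.Int.band st.2.2.2.1 0xFFFF)) <<< (3 : Nat))
  (st.1 >>> (16 : Nat), st.2.1 >>> (16 : Nat), st.2.2.1 >>> (16 : Nat), st.2.2.2.1 >>> (16 : Nat),
    PySem.Int.bor st.2.2.2.2 (interleaved <<< (64 * i)))

def interleave4_any_length_input (v : Int) (x : Int) (y : Int) (z : Int) : Int :=
  let maxBits := max (max (max (PySem.Int.bitLength v) (PySem.Int.bitLength x)) (PySem.Int.bitLength y)) (PySem.Int.bitLength z)
  -- int(ceil(max_bits / 16)) ported as exact ceiling division (exact on the stated domain: maxBits ≤ 32)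
  let iterations := (maxBits + 15) / 16
  ((List.range iterations).foldl stepA (v, x, y, z, (0 : Int))).2.2.2.2

-- ===== PORT B =====
-- one pass of B's `for j in range(total)` body
def stepB (v : Int) (x : Int) (y : Int) (z : Int) (ret : Int) (j : Nat) : Int :=
  PySem.Int.bor ret (PySem.Int.bor (PySem.Int.bor (PySem.Int.bor
    ((PySem.Int.band (v >>> j) 1) <<< (4 * j))
    ((PySem.Int.band (x >>> j) 1) <<< (4 * j + 1)))
    ((PySem.Int.band (y >>> j) 1) <<< (4 * j + 2)))
    ((PySem.Int.band (z >>> j) 1) <<< (4 * j + 3)))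

def interleave4_any_length_input_alt (v : Int) (x : Int) (y : Int) (z : Int) : Int :=
  let maxBits := max (max (max (PySem.Int.bitLength v) (PySem.Int.bitLength x)) (PySem.Int.bitLength y)) (PySem.Int.bitLength z)
  let total := 16 * ((maxBits + 15) / 16)
  (List.range total).foldl (stepB v x y z) (0 : Int)

-- ===== PRECONDITION & SPEC =====
def Spec_interleave4_any_length_input (v : Int) (x : Int) (y : Int) (z : Int) (out : Int) : Prop := out = interleave4_any_length_input_alt v x y z
instance (v : Int) (x : Int) (y : Int) (z : Int) (out : Int) : Decidable (Spec_interleave4_any_length_input v x y z out) := by unfold Spec_interleave4_any_length_input; infer_instance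

-- ===== CLAIM (what is proved, stated in full; the proofs are below) =====
def Claim_equal_interleave4_any_length_input : Prop := ∀ (v : Int) (x : Int) (y : Int) (z : Int), Dom_interleave4_any_length_input v x y z → Spec_interleave4_any_length_input v x y z (interleave4_any_length_input v x y z)

-- ===== LEMMAS AND PROOFS =====

-- Nat-level mirror of A's SWAR pass
def p13N (n0 : Nat) : Nat :=
  let n1 := n0 &&& 0xFFFF
  let n2 := (n1 ^^^ (n1 <<< 24)) &&& 0x000000FF000000FF
  let n3 := (n2 ^^^ (n2 <<< 12)) &&& 0x000F000F000F000F
  let n4 := (n3 ^^^ (n3 <<< 6)) &&& 0x0303030303030303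
  (n4 ^^^ (n4 <<< 3)) &&& 0x1111111111111111

-- big OR of g over [0, n)
def orRange (g : Nat → Nat) (n : Nat) : Nat := (List.range n).foldl (fun a r => a ||| g r) 0

-- one spread bit of B, Nat level: bit r of m sent to position 4*r+c
def bitsN (m r c : Nat) : Nat := ((m >>> r) &&& 1) <<< (4 * r + c)

-- one iteration of B's loop at Nat level (grouped as in the port)
def grpN (mv mx my mz r : Nat) : Nat := ((bitsN mv r 0 ||| bitsN mx r 1) ||| bitsN my r 2) ||| bitsN mz r 3

-- one 16-bit chunk of A at Nat level (grouped as in the port)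
def chunkN (mv mx my mz : Nat) : Nat := ((p13N mv ||| (p13N mx <<< 1)) ||| (p13N my <<< 2)) ||| (p13N mz <<< 3)

-- low 16 bits of a >> 16*i, as a Nat
def lowN (a : Int) (i : Nat) : Nat := ((a >>> (16 * i)) % 65536).toNat

-- A's accumulator after it iterations, Nat level
def retAN (v x y z : Int) (it : Nat) : Nat :=
  orRange (fun i => chunkN (lowN v i) (lowN x i) (lowN y i) (lowN z i) <<< (64 * i)) it

-- B's loop term at Nat level
def bitJ (a : Int) (j : Nat) : Nat := (PySem.Int.band (a >>> j) 1).toNat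

def gB (v x y z : Int) (j : Nat) : Nat :=
  ((bitJ v j <<< (4 * j) ||| bitJ x j <<< (4 * j + 1)) ||| bitJ y j <<< (4 * j + 2)) ||| bitJ z j <<< (4 * j + 3)

theorem natCast_shiftLeft (p : Nat) (k : Nat) : ((p : Int) <<< k) = ((p <<< k : Nat) : Int) := rfl

theorem band_mod (b : Int) : PySem.Int.band b 65535 = b % 65536 := by
  unfold PySem.Int.band
  by_cases hb : 0 ≤ b
  · rw [if_pos hb, if_pos (by norm_num : (0:Int) ≤ 65535)]
    rw [show (65535 : Int).toNat = 65535 from rfl]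
    rw [Nat.and_two_pow_sub_one_eq_mod b.toNat 16]
    omega
  · rw [if_neg hb, if_pos (by norm_num : (0:Int) ≤ 65535)]
    rw [show (65535 : Int).toNat = 65535 from rfl]
    have h2 : 65535 &&& (-b - 1).toNat = (-b - 1).toNat % 65536 := by
      rw [Nat.and_comm]; exact Nat.and_two_pow_sub_one_eq_mod _ 16
    rw [h2]
    omega

theorem part1by3_cast (b : Int) : part1by3 b = ((p13N (b % 65536).toNat : Nat) : Int) := by
  unfold part1by3 p13N
  have hm : PySem.Int.band b 0xFFFF = (((b % 65536).toNat : Nat) : Int) := by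
    rw [show (0xFFFF : Int) = 65535 from rfl, band_mod]
    exact (Int.toNat_of_nonneg (Int.emod_nonneg _ (by norm_num))).symm
  rw [hm]
  set m := (b % 65536).toNat
  have e1 : m &&& 0xFFFF = m := by
    rw [Nat.and_two_pow_sub_one_eq_mod m 16]
    have : b % 65536 < 65536 := Int.emod_lt_of_pos b (by norm_num)
    have : 0 ≤ b % 65536 := Int.emod_nonneg _ (by norm_num)
    omega
  have c1 : (0x000000FF000000FF : Int) = ((0x000000FF000000FF : Nat) : Int) := rfl
  have c2 : (0x000F000F000F000F : Int) = ((0x000F000F000F000F : Nat) : Int) := rfl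
  have c3 : (0x0303030303030303 : Int) = ((0x0303030303030303 : Nat) : Int) := rfl
  have c4 : (0x1111111111111111 : Int) = ((0x1111111111111111 : Nat) : Int) := rfl
  simp only [natCast_shiftLeft, PySem.Int.bxor_natCast, c1, c2, c3, c4,
    PySem.Int.band_natCast, e1]

theorem tb_ge (m : Nat) (hm : m < 2 ^ 64) (k : Nat) (hk : 64 ≤ k) : m.testBit k = false :=
  Nat.testBit_lt_two_pow (lt_of_lt_of_le hm (Nat.pow_le_pow_right (by norm_num) hk))

theorem m0_tb (k : Nat) : (0xFFFF : Nat).testBit k = decide (k < 16) := by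
  by_cases hk : k < 64
  · interval_cases k <;> decide
  · rw [tb_ge _ (by norm_num) k (by omega)]
    simp; omega

theorem m1_tb (k : Nat) : (0x000000FF000000FF : Nat).testBit k = decide (k < 64 ∧ k % 32 < 8) := by
  by_cases hk : k < 64
  · interval_cases k <;> decide
  · rw [tb_ge _ (by norm_num) k (by omega)]
    simp; omega

theorem m2_tb (k : Nat) : (0x000F000F000F000F : Nat).testBit k = decide (k < 64 ∧ k % 16 < 4) := by
  by_cases hk : k < 64
  · interval_cases k <;> decide
  · rw [tb_ge _ (by norm_num) k (by omega)]
    simp; omega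

theorem m3_tb (k : Nat) : (0x0303030303030303 : Nat).testBit k = decide (k < 64 ∧ k % 8 < 2) := by
  by_cases hk : k < 64
  · interval_cases k <;> decide
  · rw [tb_ge _ (by norm_num) k (by omega)]
    simp; omega

theorem m4_tb (k : Nat) : (0x1111111111111111 : Nat).testBit k = decide (k < 64 ∧ k % 4 = 0) := by
  by_cases hk : k < 64
  · interval_cases k <;> decide
  · rw [tb_ge _ (by norm_num) k (by omega)]
    simp; omega

theorem mod2_tb (x : Nat) : x % 2 = (x.testBit 0).toNat := by
  simpa using (Nat.toNat_testBit x 0).symm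

theorem and_mod2 (a b : Nat) : (a &&& b) % 2 = a % 2 * (b % 2) := by
  rw [mod2_tb (a &&& b), mod2_tb a, mod2_tb b, Nat.testBit_and]
  cases a.testBit 0 <;> cases b.testBit 0 <;> simp

theorem xor_mod2 (a b : Nat) : (a ^^^ b) % 2 = (a % 2 + b % 2) % 2 := by
  rw [mod2_tb (a ^^^ b), mod2_tb a, mod2_tb b, Nat.testBit_xor]
  cases a.testBit 0 <;> cases b.testBit 0 <;> simp

theorem sl_mod2 (a c : Nat) (hc : 0 < c) : (a <<< c) % 2 = 0 := by
  rw [Nat.shiftLeft_eq, Nat.mul_mod, Nat.pow_mod]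
  simp [Nat.zero_pow hc]

theorem stage_mod2 (Y M s : Nat) (hM : M % 2 = 1) (hs : 0 < s) :
    ((Y ^^^ Y <<< s) &&& M) % 2 = Y % 2 := by
  rw [and_mod2, hM, mul_one, xor_mod2, sl_mod2 _ _ hs]
  omega

set_option maxHeartbeats 2000000 in
theorem p13N_testBit_lt (n k : Nat) (hk : k < 64) :
    (p13N n).testBit k = (decide (k % 4 = 0) && n.testBit (k / 4)) := by
  unfold p13N
  interval_cases k
  · simp only [Nat.testBit_zero]
    rw [stage_mod2 _ _ _ (by norm_num) (by norm_num),
        stage_mod2 _ _ _ (by norm_num) (by norm_num),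
        stage_mod2 _ _ _ (by norm_num) (by norm_num),
        stage_mod2 _ _ _ (by norm_num) (by norm_num),
        and_mod2]
    norm_num
  all_goals
    simp [Nat.testBit_and, Nat.testBit_xor, Nat.testBit_shiftLeft, m0_tb, m1_tb, m2_tb, m3_tb, m4_tb]

theorem p13N_testBit_ge (n k : Nat) (hk : 64 ≤ k) : (p13N n).testBit k = false := by
  apply Nat.testBit_lt_two_pow
  calc p13N n ≤ 0x1111111111111111 := Nat.and_le_right
    _ < 2 ^ 64 := by norm_num
    _ ≤ 2 ^ k := Nat.pow_le_pow_right (by norm_num) hk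

theorem orRange_succ (g : Nat → Nat) (n : Nat) : orRange g (n + 1) = orRange g n ||| g n := by
  unfold orRange; rw [List.range_succ, List.foldl_append]; rfl

theorem foldl_or_start (g : Nat → Nat) (l : List Nat) (a : Nat) :
    l.foldl (fun acc r => acc ||| g r) a = a ||| l.foldl (fun acc r => acc ||| g r) 0 := by
  induction l generalizing a with
  | nil => simp
  | cons h t ih =>
    simp only [List.foldl_cons]
    rw [ih (a ||| g h), ih (0 ||| g h), Nat.zero_or, Nat.lor_assoc]

theorem orRange_add (g : Nat → Nat) (m n : Nat) :
    orRange g (m + n) = orRange g m ||| orRange (fun r => g (m + r)) n := by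
  unfold orRange
  rw [List.range_add, List.foldl_append, List.foldl_map, foldl_or_start]

theorem orRange_congr (g g' : Nat → Nat) (n : Nat) (h : ∀ r, r < n → g r = g' r) :
    orRange g n = orRange g' n := by
  induction n with
  | zero => rfl
  | succ k ih => rw [orRange_succ, orRange_succ, ih (fun r hr => h r (by omega)), h k (by omega)]

theorem orRange_shift (g : Nat → Nat) (s n : Nat) :
    orRange (fun r => g r <<< s) n = (orRange g n) <<< s := by
  induction n with
  | zero => simp [orRange]
  | succ k ih => rw [orRange_succ, orRange_succ, ih, Nat.shiftLeft_or_distrib]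

theorem key4 (q r c c' : Nat) (hc : c < 4) (hc' : c' < 4) :
    decide (4 * q + c = 4 * r + c') = (decide (q = r) && decide (c = c')) := by
  rw [show (decide (q = r) && decide (c = c')) = decide (q = r ∧ c = c') from (Bool.decide_and _ _).symm]
  exact decide_eq_decide.mpr (by constructor <;> omega)

theorem bitsN_testBit (m r c k : Nat) :
    (bitsN m r c).testBit k = (decide (k = 4 * r + c) && m.testBit r) := by
  unfold bitsN
  have h1 : (m >>> r) &&& 1 = (m.testBit r).toNat := by
    rw [Nat.and_one_is_mod, Nat.toNat_testBit, Nat.shiftRight_eq_div_pow]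
  rw [h1]
  cases hb : m.testBit r
  · simp
  · simp only [Bool.toNat_true, Bool.and_true]
    rw [show (1 : Nat) <<< (4 * r + c) = 2 ^ (4 * r + c) from by rw [Nat.shiftLeft_eq, Nat.one_mul]]
    rw [Nat.testBit_two_pow]
    simp [eq_comm]

theorem stream_testBit (m n k : Nat) :
    (orRange (fun r => bitsN m r 0) n).testBit k
      = (decide (k / 4 < n) && decide (k % 4 = 0) && m.testBit (k / 4)) := by
  induction n with
  | zero => simp [orRange]
  | succ j ih =>
    rw [orRange_succ, Nat.testBit_or, ih, bitsN_testBit]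
    obtain ⟨q, c, hc, rfl⟩ : ∃ q c, c < 4 ∧ k = 4 * q + c := ⟨k / 4, k % 4, by omega, by omega⟩
    have hq : (4 * q + c) / 4 = q := by omega
    have hm : (4 * q + c) % 4 = c := by omega
    rw [hq, hm, show 4 * j = 4 * j + 0 from rfl, key4 q j c 0 hc (by omega)]
    by_cases hc0 : c = 0 <;> by_cases hqj : q = j <;>
      simp [hc0, hqj, lt_self_iff_false,
        show ∀ q j : Nat, (q < j + 1) = (q < j ∨ q = j) from fun q j => propext (by omega)]

theorem stream_eq (m : Nat) : orRange (fun r => bitsN m r 0) 16 = p13N m := by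
  apply Nat.eq_of_testBit_eq
  intro k
  rw [stream_testBit]
  by_cases hk : k < 64
  · rw [p13N_testBit_lt m k hk]
    simp [show k / 4 < 16 from by omega]
  · rw [p13N_testBit_ge m k (by omega)]
    simp [show ¬(k / 4 < 16) from by omega]

theorem spread_shift (m c n : Nat) :
    orRange (fun r => bitsN m r c) n = (orRange (fun r => bitsN m r 0) n) <<< c := by
  rw [← orRange_shift]
  apply orRange_congr
  intro r _
  unfold bitsN
  rw [← Nat.shiftLeft_add, show 4 * r + 0 + c = 4 * r + c from by omega]

theorem orRange_or4 (a b c d : Nat → Nat) (n : Nat) :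
    orRange (fun r => ((a r ||| b r) ||| c r) ||| d r) n
      = ((orRange a n ||| orRange b n) ||| orRange c n) ||| orRange d n := by
  induction n with
  | zero => simp [orRange]
  | succ k ih =>
    rw [orRange_succ, orRange_succ, orRange_succ, orRange_succ, orRange_succ, ih]
    ac_rfl

-- core: one 16-bit SWAR chunk = the OR of its 16 spread bits
theorem chunk_eq_or16 (mv mx my mz : Nat) :
    orRange (grpN mv mx my mz) 16 = chunkN mv mx my mz := by
  unfold grpN
  rw [orRange_or4 (fun r => bitsN mv r 0) (fun r => bitsN mx r 1) (fun r => bitsN my r 2) (fun r => bitsN mz r 3) 16]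
  rw [spread_shift mx 1 16, spread_shift my 2 16, spread_shift mz 3 16]
  rw [stream_eq mv, stream_eq mx, stream_eq my, stream_eq mz]
  rfl

theorem emod_ediv_emod (b : Int) (r : Nat) (hr : r < 16) :
    (b / 2 ^ r) % 2 = ((b % 65536) / 2 ^ r) % 2 := by
  have h1 : (2 : Int) ^ (15 - r) * 2 * 2 ^ r = 65536 := by
    have e : (2 : Int) ^ (15 - r) * 2 * 2 ^ r = 2 ^ (15 - r + 1 + r) := by
      rw [pow_add, pow_add, pow_one]
    rw [e, show 15 - r + 1 + r = 16 from by omega]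
    norm_num
  have hdecomp : b = b % 65536 + (b / 65536) * (2 ^ (15 - r) * 2) * 2 ^ r := by
    rw [mul_assoc, h1, mul_comm (b / 65536) 65536]
    omega
  conv_lhs => rw [hdecomp]
  rw [Int.add_mul_ediv_right _ _ (by positivity : (2:Int)^r ≠ 0)]
  rw [← mul_assoc]
  omega

theorem bit_cast (a : Int) (i r : Nat) (hr : r < 16) :
    PySem.Int.band (a >>> (16 * i + r)) 1 = (((lowN a i >>> r) &&& 1 : Nat) : Int) := by
  rw [PySem.Int.band_one, PySem.Int.mod_eq_emod_of_pos (by norm_num : (0:Int) < 2)]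
  rw [Int.shiftRight_add]
  set b := a >>> (16 * i)
  rw [Int.shiftRight_eq_div_pow]
  have hb : (lowN a i : Int) = b % 65536 := by
    unfold lowN
    exact Int.toNat_of_nonneg (Int.emod_nonneg _ (by norm_num))
  rw [Nat.and_one_is_mod, Nat.shiftRight_eq_div_pow]
  push_cast [hb]
  rw [emod_ediv_emod b r hr]

theorem band_low_eq (a : Int) (i : Nat) :
    part1by3 (PySem.Int.band (a >>> (16 * i)) 0xFFFF) = ((p13N (lowN a i) : Nat) : Int) := by
  rw [part1by3_cast]
  congr 2
  rw [show (0xFFFF : Int) = 65535 from rfl, band_mod]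
  unfold lowN
  congr 1
  apply Int.emod_emod_of_dvd
  norm_num

theorem loopA_char (v x y z : Int) (it : Nat) :
    (List.range it).foldl stepA (v, x, y, z, (0 : Int))
      = (v >>> (16 * it), x >>> (16 * it), y >>> (16 * it), z >>> (16 * it),
         ((retAN v x y z it : Nat) : Int)) := by
  induction it with
  | zero => simp [retAN, orRange]
  | succ n ih =>
    rw [List.range_succ, List.foldl_append, ih]
    show stepA _ n = _
    unfold stepA
    simp only [Prod.mk.injEq]
    refine ⟨?_, ?_, ?_, ?_, ?_⟩
    · rw [show 16 * (n + 1) = 16 * n + 16 from by ring, Int.shiftRight_add]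
    · rw [show 16 * (n + 1) = 16 * n + 16 from by ring, Int.shiftRight_add]
    · rw [show 16 * (n + 1) = 16 * n + 16 from by ring, Int.shiftRight_add]
    · rw [show 16 * (n + 1) = 16 * n + 16 from by ring, Int.shiftRight_add]
    · rw [band_low_eq v n, band_low_eq x n, band_low_eq y n, band_low_eq z n]
      rw [natCast_shiftLeft, natCast_shiftLeft, natCast_shiftLeft,
        PySem.Int.bor_natCast, PySem.Int.bor_natCast, PySem.Int.bor_natCast,
        natCast_shiftLeft, PySem.Int.bor_natCast]
      rw [show retAN v x y z (n + 1)
            = retAN v x y z n ||| chunkN (lowN v n) (lowN x n) (lowN y n) (lowN z n) <<< (64 * n)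
          from orRange_succ _ n]
      rfl

theorem stepB_cast (v x y z : Int) (p : Nat) (j : Nat) :
    stepB v x y z ((p : Nat) : Int) j = ((p ||| gB v x y z j : Nat) : Int) := by
  unfold stepB gB bitJ
  have hcast : ∀ a : Int, PySem.Int.band (a >>> j) 1 = (((PySem.Int.band (a >>> j) 1).toNat : Nat) : Int) := by
    intro a
    rw [PySem.Int.band_one, PySem.Int.mod_eq_emod_of_pos (by norm_num : (0:Int) < 2)]
    exact (Int.toNat_of_nonneg (Int.emod_nonneg _ (by norm_num))).symm
  conv_lhs => rw [hcast v, hcast x, hcast y, hcast z]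
  rw [natCast_shiftLeft, natCast_shiftLeft, natCast_shiftLeft, natCast_shiftLeft,
    PySem.Int.bor_natCast, PySem.Int.bor_natCast, PySem.Int.bor_natCast, PySem.Int.bor_natCast]

theorem loopB_char (v x y z : Int) (n : Nat) :
    (List.range n).foldl (stepB v x y z) (0 : Int) = ((orRange (gB v x y z) n : Nat) : Int) := by
  induction n with
  | zero => simp [orRange]
  | succ k ih =>
    rw [List.range_succ, List.foldl_append, orRange_succ]
    show stepB v x y z ((List.range k).foldl (stepB v x y z) 0) k = _
    rw [ih, stepB_cast]

theorem gB_chunk (v x y z : Int) (i r : Nat) (hr : r < 16) :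
    gB v x y z (16 * i + r) = grpN (lowN v i) (lowN x i) (lowN y i) (lowN z i) r <<< (64 * i) := by
  unfold gB grpN
  have hb : ∀ a : Int, bitJ a (16 * i + r) = (lowN a i >>> r) &&& 1 := by
    intro a
    unfold bitJ
    rw [bit_cast a i r hr, Int.toNat_natCast]
  rw [hb v, hb x, hb y, hb z]
  unfold bitsN
  rw [Nat.shiftLeft_or_distrib, Nat.shiftLeft_or_distrib, Nat.shiftLeft_or_distrib]
  rw [← Nat.shiftLeft_add, ← Nat.shiftLeft_add, ← Nat.shiftLeft_add, ← Nat.shiftLeft_add]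
  rw [show 4 * r + 0 + 64 * i = 4 * (16 * i + r) from by omega,
      show 4 * r + 1 + 64 * i = 4 * (16 * i + r) + 1 from by omega,
      show 4 * r + 2 + 64 * i = 4 * (16 * i + r) + 2 from by omega,
      show 4 * r + 3 + 64 * i = 4 * (16 * i + r) + 3 from by omega]

theorem bridge (v x y z : Int) (it : Nat) :
    orRange (gB v x y z) (16 * it) = retAN v x y z it := by
  induction it with
  | zero => rfl
  | succ n ih =>
    rw [show 16 * (n + 1) = 16 * n + 16 from by omega, orRange_add, ih]
    rw [show retAN v x y z (n + 1)
          = retAN v x y z n ||| chunkN (lowN v n) (lowN x n) (lowN y n) (lowN z n) <<< (64 * n)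
        from orRange_succ _ n]
    congr 1
    rw [orRange_congr (fun r => gB v x y z (16 * n + r))
          (fun r => grpN (lowN v n) (lowN x n) (lowN y n) (lowN z n) r <<< (64 * n)) 16
          (fun r hr => gB_chunk v x y z n r hr)]
    rw [orRange_shift, chunk_eq_or16]

theorem main_eq (v x y z : Int) :
    interleave4_any_length_input v x y z = interleave4_any_length_input_alt v x y z := by
  unfold interleave4_any_length_input interleave4_any_length_input_alt
  simp only [loopA_char, loopB_char]
  rw [bridge]

-- ===== VERDICT (by name: the statement is the Claim_ definition above) =====
theorem interleave4_any_length_input_spec : Claim_equal_interleave4_any_length_input := by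
  intro v x y z _
  unfold Spec_interleave4_any_length_input
  exact main_eq v x y z
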